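-- pv_equiv track=rewrite | github.com/Aizak5/AOIS | lab3/lab3.py | _select_essential
-- ===== SOURCE A (Python) =====
-- def _covers(pi, mt):
--     return all(p == '-' or p == m for p, m in zip(pi, mt))
--
-- def _select_essential(primes, minterms):
--     table = {pi: [mt for mt in minterms if _covers(pi, mt)] for pi in primes}
--     essential = set()
--     covered = set()
--     for mt in minterms:
--         cov = [pi for pi in primes if _covers(pi, mt)]
--         if len(cov) == 1:
--             essential.add(cov[0])
--     for pi in essential:
--         covered |= set(table[pi])
--     rem = set(minterms) - covered
--     while rem:
--         pi, mts = max(table.items(), key=lambda kv: len(set(kv[1]) & rem))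
--         essential.add(pi)
--         rem -= set(mts)
--     return essential
-- ===== SOURCE B (Python) =====
-- def _select_essential(primes, minterms):
--     # Bitset re-implementation: each prime's coverage is one integer bitmask over
--     # the distinct minterms; essentials are read off single-bit columns and the
--     # greedy cover runs recursively on popcounts of mask & rem.
--     umts = list(dict.fromkeys(minterms))
--
--     def _mask(pi):
--         m, bit = 0, 1
--         for mt in umts:
--             if all(p == '-' or p == c for p, c in zip(pi, mt)):
--                 m += bit
--             bit += bit
--         return m
--
--     masks = [_mask(pi) for pi in primes]
--
--     chosen = set()
--     bit = 1
--     for mt in umts: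
--         hits = [pi for pi, m in zip(primes, masks) if m & bit]
--         if len(hits) == 1:
--             chosen.add(hits[0])
--         bit += bit
--
--     rem = bit - 1                      # all minterm columns set
--     for pi, m in zip(primes, masks):
--         if pi in chosen:
--             rem ^= rem & m             # clear columns covered by essentials
--
--     def _pop(x):
--         return 0 if x == 0 else (x & 1) + _pop(x >> 1)
--
--     def _greedy(rem, chosen):
--         if rem == 0:
--             return chosen
--         pi, m = max(zip(primes, masks), key=lambda pm: _pop(pm[1] & rem))
--         return _greedy(rem ^ (rem & m), chosen | {pi})
--
--     return _greedy(rem, chosen)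
-- ===== Notes on version B (the rewrite author's own statement) =====
-- stated objective: alternative
-- what changed: B replaces A's dict-of-lists cover table and Python-set algebra by integer bitmasks: each prime's coverage is one bitmask over the distinct minterms, essentials are read off single-bit columns, essential coverage is cleared by bitwise operations, and the greedy cover is a recursive function ranking primes by popcount of mask & rem.
import Mathlib
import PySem

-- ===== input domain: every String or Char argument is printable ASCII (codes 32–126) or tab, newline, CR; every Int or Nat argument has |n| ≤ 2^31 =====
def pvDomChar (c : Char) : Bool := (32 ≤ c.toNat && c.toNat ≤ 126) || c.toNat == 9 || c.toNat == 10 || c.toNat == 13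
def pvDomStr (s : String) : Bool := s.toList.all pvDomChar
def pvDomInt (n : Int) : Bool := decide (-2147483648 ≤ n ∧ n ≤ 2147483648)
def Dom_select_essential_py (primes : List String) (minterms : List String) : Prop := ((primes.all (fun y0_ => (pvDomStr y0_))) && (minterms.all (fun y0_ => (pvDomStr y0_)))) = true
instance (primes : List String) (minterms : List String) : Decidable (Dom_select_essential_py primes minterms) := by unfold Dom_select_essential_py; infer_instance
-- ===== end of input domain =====

-- B re-implements the cover selection on integer bitmasks: one mask per prime over the distinct
-- minterms, essentials read off single-bit columns, and a recursive greedy cover driven by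
-- popcounts, instead of A's dict-of-lists table and set operations (objective: alternative).
-- A returns a Python set; the two ports build it in the same insertion order.

-- ===== PORT A =====
-- _covers: all(p == '-' or p == m for p, m in zip(pi, mt))
def pvCovers (pi mt : String) : Bool :=
  ((pi.toList).zip (mt.toList)).all (fun pm => pm.1 == '-' || pm.1 == pm.2)

-- the 'while rem:' loop of A; fuel = current |rem| suffices because under Pre_ every pass
-- removes at least one element of rem.  'none' from max? is Python's ValueError (max of an
-- empty table), excluded by Pre_.
def pvLoopA (items : List (String × List String)) : Nat → PySem.Set String → PySem.Set String → PySem.Set String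
  | 0, _, ess => ess
  | n+1, rem, ess =>
    if rem.isEmpty then ess else
      match PySem.List.max? items (fun kv => PySem.Set.len (PySem.Set.inter (PySem.Set.ofList kv.2) rem)) with
      | none => ess
      | some kv => pvLoopA items n (PySem.Set.diff rem (PySem.Set.ofList kv.2)) (PySem.Set.add ess kv.1)

def select_essential_py (primes : List String) (minterms : List String) : List String :=
  let table : PySem.Dict String (List String) :=
    primes.foldl (fun d pi => d.insert pi (minterms.filter (fun mt => pvCovers pi mt))) PySem.Dict.empty
  let essential : PySem.Set String :=
    minterms.foldl (fun e mt =>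
      let cov := primes.filter (fun pi => pvCovers pi mt)
      if cov.length == 1 then PySem.Set.add e (cov.headD "") else e)  -- cov[0]; total: cov.length = 1
      PySem.Set.empty
  let covered : PySem.Set String :=
    essential.foldl (fun c pi => PySem.Set.union c (PySem.Set.ofList (table.getD pi []))) PySem.Set.empty
  let rem : PySem.Set String := PySem.Set.diff (PySem.Set.ofList minterms) covered
  pvLoopA table.items rem.length rem essential

-- ===== PORT B =====
-- _mask: m, bit = 0, 1; for mt in umts: if covers: m += bit; bit += bit
def pvMask (umts : List String) (pi : String) : Nat :=
  (umts.foldl (fun (s : Nat × Nat) mt =>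
    (if pvCovers pi mt then s.1 + s.2 else s.1, s.2 + s.2)) (0, 1)).1

-- _pop: 0 if x == 0 else (x & 1) + _pop(x >> 1)
def pvPop (x : Nat) : Nat :=
  if x = 0 then 0 else (x &&& 1) + pvPop (x >>> 1)
decreasing_by simp only [Nat.shiftRight_one]; omega

-- _greedy: recursion on rem; fuel = popcount of rem suffices because every productive step
-- clears at least one bit; 'none' from max? (empty zip) is outside Pre_.
def pvGreedy (pairs : List (String × Nat)) : Nat → Nat → PySem.Set String → PySem.Set String
  | 0, _, chosen => chosen
  | f+1, rem, chosen =>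
    if rem = 0 then chosen else
      match PySem.List.max? pairs (fun pm => (pvPop (pm.2 &&& rem) : Int)) with
      | none => chosen
      | some pm => pvGreedy pairs f (rem ^^^ (rem &&& pm.2)) (PySem.Set.add chosen pm.1)

def select_essential_py_alt (primes : List String) (minterms : List String) : List String :=
  let umts : List String := PySem.List.dedup minterms
  let masks : List Nat := primes.map (fun pi => pvMask umts pi)
  let cb : PySem.Set String × Nat :=
    umts.foldl (fun (s : PySem.Set String × Nat) _mt =>
      let hits := ((primes.zip masks).filter (fun pm => pm.2 &&& s.2 != 0)).map Prod.fst
      (if hits.length == 1 then PySem.Set.add s.1 (hits.headD "") else s.1, s.2 + s.2))  -- hits[0]; total: length = 1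
      (PySem.Set.empty, 1)
  let rem0 : Nat :=
    (primes.zip masks).foldl (fun r pm =>
      if PySem.Set.contains cb.1 pm.1 then r ^^^ (r &&& pm.2) else r) (cb.2 - 1)
  pvGreedy (primes.zip masks) (pvPop rem0) rem0 cb.1

-- ===== PRECONDITION & SPEC =====
-- Pre_ holds exactly when every minterm is covered by some prime: otherwise some minterm stays in
-- rem forever and Python's A never returns (it loops forever, or raises ValueError on max of an
-- empty table when primes = []).
def Pre_select_essential_py (primes : List String) (minterms : List String) : Prop :=
  ∀ mt ∈ minterms, ∃ pi ∈ primes, pvCovers pi mt = true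
instance (primes : List String) (minterms : List String) : Decidable (Pre_select_essential_py primes minterms) := by unfold Pre_select_essential_py; infer_instance

def pvWitness_select_essential_py : List String × List String := (["1-", "-0"], ["10", "11", "00"])

def Spec_select_essential_py (primes : List String) (minterms : List String) (out : List String) : Prop := out = select_essential_py_alt primes minterms
instance (primes : List String) (minterms : List String) (out : List String) : Decidable (Spec_select_essential_py primes minterms out) := by unfold Spec_select_essential_py; infer_instance

-- ===== CLAIM (what is proved, stated in full; the proofs are below) =====
def Claim_equal_select_essential_py : Prop := ∀ (primes : List String) (minterms : List String), Dom_select_essential_py primes minterms → Pre_select_essential_py primes minterms → Spec_select_essential_py primes minterms (select_essential_py primes minterms)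

-- ===== LEMMAS AND PROOFS =====

-- proof-side views of B's bit machinery
def pvOfBits : List Bool → Nat
  | [] => 0
  | b :: bs => (if b then 1 else 0) + 2 * pvOfBits bs

-- the sub-list of l selected by the set bits of r (bit 0 = head)
def pvSel {α : Type} : List α → Nat → List α
  | [], _ => []
  | x :: xs, r => if r.testBit 0 then x :: pvSel xs (r >>> 1) else pvSel xs (r >>> 1)

theorem pv_ofBits_testBit (bs : List Bool) : ∀ (j : Nat),
    (pvOfBits bs).testBit j = bs.getD j false := by
  induction bs with
  | nil => intro j; simp [pvOfBits]
  | cons b bs ih =>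
    intro j
    cases j with
    | zero =>
      rw [Nat.testBit_zero]
      cases b <;> simp [pvOfBits]
    | succ j =>
      rw [Nat.testBit_add_one]
      have h2 : pvOfBits (b :: bs) / 2 = pvOfBits bs := by
        cases b <;> simp [pvOfBits] <;> omega
      rw [h2, ih]
      simp

theorem pv_ofBits_lt (bs : List Bool) : pvOfBits bs < 2 ^ bs.length := by
  induction bs with
  | nil => simp [pvOfBits]
  | cons b bs ih =>
    have : (2:Nat) ^ (b :: bs).length = 2 * 2 ^ bs.length := by
      simp [List.length_cons, pow_succ]; ring
    rw [this]
    cases b <;> simp [pvOfBits] <;> omega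

theorem pv_mask_fold (c : String → Bool) (l : List String) :
    ∀ (m b : Nat),
      l.foldl (fun (s : Nat × Nat) mt => (if c mt then s.1 + s.2 else s.1, s.2 + s.2)) (m, b)
        = (m + b * pvOfBits (l.map c), b * 2 ^ l.length) := by
  induction l with
  | nil => intro m b; simp [pvOfBits]
  | cons mt rest ih =>
    intro m b
    simp only [List.foldl_cons]
    by_cases hc : c mt = true
    · rw [if_pos hc, ih]
      simp only [List.map_cons, pvOfBits, hc, if_pos, List.length_cons, Prod.mk.injEq]
      constructor <;> ring
    · rw [if_neg hc, ih]
      simp only [Bool.not_eq_true] at hc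
      simp only [List.map_cons, pvOfBits, hc, List.length_cons, Prod.mk.injEq, Bool.false_eq_true, if_false]
      constructor <;> ring

theorem pv_mask_eq (umts : List String) (pi : String) :
    pvMask umts pi = pvOfBits (umts.map (pvCovers pi)) := by
  unfold pvMask
  rw [pv_mask_fold (pvCovers pi) umts 0 1]
  simp

theorem pv_mask_testBit (umts : List String) (pi : String) (j : Nat) :
    (pvMask umts pi).testBit j
      = if h : j < umts.length then pvCovers pi umts[j] else false := by
  rw [pv_mask_eq, pv_ofBits_testBit]
  by_cases h : j < umts.length
  · simp [h, List.getD_eq_getElem?_getD]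
  · simp [h, List.getD_eq_getElem?_getD]

theorem pv_mask_lt (umts : List String) (pi : String) : pvMask umts pi < 2 ^ umts.length := by
  rw [pv_mask_eq]
  simpa using pv_ofBits_lt (umts.map (pvCovers pi))

theorem pv_pop_eq_countP : ∀ (n x : Nat), x < 2 ^ n →
    pvPop x = (List.range n).countP x.testBit := by
  intro n
  induction n with
  | zero =>
    intro x hx
    interval_cases x
    simp [pvPop]
  | succ n ih =>
    intro x hx
    by_cases hx0 : x = 0
    · subst hx0
      rw [pvPop]
      rw [if_pos rfl]
      symm
      exact List.countP_eq_zero.mpr (fun j _ => by simp [Nat.zero_testBit])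
    · rw [pvPop, if_neg hx0]
      have hh : x >>> 1 < 2 ^ n := by
        rw [Nat.shiftRight_one]
        have := Nat.pow_succ 2 n
        omega
      rw [ih _ hh, List.range_succ_eq_map, List.countP_cons, List.countP_map]
      have h1 : (x &&& 1) = if x.testBit 0 then 1 else 0 := by
        rw [Nat.and_one_is_mod, Nat.testBit_zero]
        rcases Nat.mod_two_eq_zero_or_one x with h | h <;> simp [h]
      have h2 : ∀ j, (x >>> 1).testBit j = x.testBit (j + 1) := by
        intro j; rw [Nat.testBit_shiftRight]; ring_nf
      have hcong : List.countP (x.testBit ∘ Nat.succ) (List.range n)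
          = List.countP (x >>> 1).testBit (List.range n) :=
        List.countP_congr (fun j _ => by simp [Function.comp, h2 j, Nat.succ_eq_add_one])
      rw [hcong, h1]
      by_cases hb : x.testBit 0 = true <;> simp [hb] <;> omega

theorem pv_sel_eq_filter_of {α : Type} (q : α → Bool) :
    ∀ (l : List α) (r : Nat), (∀ j (h : j < l.length), r.testBit j = q l[j]) →
      pvSel l r = l.filter q := by
  intro l
  induction l with
  | nil => intro r _; simp [pvSel]
  | cons x xs ih =>
    intro r h
    have h0 : r.testBit 0 = q x := h 0 (by simp)
    have ht : ∀ j (hj : j < xs.length), (r >>> 1).testBit j = q xs[j] := by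
      intro j hj
      rw [Nat.testBit_shiftRight]
      have := h (1 + j) (by simp; omega)
      simpa [Nat.add_comm] using this
    unfold pvSel
    rw [h0, ih _ ht]
    by_cases hq : q x = true
    · simp [hq]
    · simp only [Bool.not_eq_true] at hq; simp [hq]

theorem pv_sel_filter {α : Type} (q : α → Bool) :
    ∀ (l : List α) (r r' : Nat),
      (∀ j (h : j < l.length), r'.testBit j = (r.testBit j && q l[j])) →
      pvSel l r' = (pvSel l r).filter q := by
  intro l
  induction l with
  | nil => intro r r' _; simp [pvSel]
  | cons x xs ih =>
    intro r r' h
    have h0 : r'.testBit 0 = (r.testBit 0 && q x) := h 0 (by simp)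
    have ht : ∀ j (hj : j < xs.length), (r' >>> 1).testBit j = ((r >>> 1).testBit j && q xs[j]) := by
      intro j hj
      rw [Nat.testBit_shiftRight, Nat.testBit_shiftRight]
      have := h (1 + j) (by simp; omega)
      simpa [Nat.add_comm] using this
    unfold pvSel
    rw [h0, ih _ _ ht]
    by_cases hr : r.testBit 0 = true
    · by_cases hq : q x = true
      · simp [hr, hq]
      · simp only [Bool.not_eq_true] at hq; simp [hr, hq]
    · simp only [Bool.not_eq_true] at hr; simp [hr]

theorem pv_sel_countP {α : Type} [Inhabited α] (c : α → Bool) :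
    ∀ (l : List α) (r : Nat),
      (pvSel l r).countP c = (List.range l.length).countP (fun j => r.testBit j && c (l.getD j default)) := by
  intro l
  induction l with
  | nil => intro r; simp [pvSel]
  | cons x xs ih =>
    intro r
    unfold pvSel
    simp only [List.length_cons]
    rw [List.range_succ_eq_map]
    rw [List.countP_cons, List.countP_map]
    have hc2 : List.countP ((fun j => r.testBit j && c ((x :: xs).getD j default)) ∘ Nat.succ) (List.range xs.length)
        = List.countP (fun j => (r >>> 1).testBit j && c (xs.getD j default)) (List.range xs.length) :=
      List.countP_congr (fun j _ => by
        simp [Function.comp, Nat.testBit_shiftRight, Nat.add_comm 1 j, List.getD])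
    rw [hc2, ← ih (r >>> 1)]
    by_cases hr : r.testBit 0 = true
    · rw [if_pos hr, List.countP_cons]
      simp [hr, List.getD]
    · simp only [Bool.not_eq_true] at hr
      rw [if_neg (by simp [hr])]
      simp [hr, List.getD]

theorem pv_sel_sublist {α : Type} : ∀ (l : List α) (r : Nat), (pvSel l r).Sublist l := by
  intro l
  induction l with
  | nil => intro r; simp [pvSel]
  | cons x xs ih =>
    intro r
    unfold pvSel
    by_cases hr : r.testBit 0 = true
    · simpa [hr] using List.Sublist.cons₂ x (ih (r >>> 1))
    · simp only [Bool.not_eq_true] at hr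
      simp only [hr, Bool.false_eq_true, if_false]
      exact List.Sublist.cons x (ih (r >>> 1))

theorem pv_sel_zero {α : Type} : ∀ (l : List α), pvSel l 0 = [] := by
  intro l
  induction l with
  | nil => rfl
  | cons x xs ih => simp [pvSel, Nat.zero_shiftRight, ih]

theorem pv_sel_nil_iff {α : Type} [Inhabited α] (l : List α) (r : Nat)
    (hh : ∀ j, l.length ≤ j → r.testBit j = false) :
    pvSel l r = [] ↔ r = 0 := by
  constructor
  · intro hnil
    have hlen := pv_sel_countP (fun _ => true) l r
    rw [hnil] at hlen
    simp only [List.countP_true, List.length_nil, Bool.and_true] at hlen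
    have hz := (List.countP_eq_zero.mp hlen.symm)
    apply Nat.eq_of_testBit_eq
    intro j
    rw [Nat.zero_testBit]
    by_cases hj : j < l.length
    · simpa using hz j (List.mem_range.mpr hj)
    · exact hh j (by omega)
  · intro h; subst h; exact pv_sel_zero l

theorem pv_add_of_mem {s : PySem.Set String} {x : String} (h : x ∈ s) : s.add x = s := by
  simp [PySem.Set.add, h]

theorem pv_max?_snoc {α : Type} (l : List α) (x : α) (k : α → Int) :
    PySem.List.max? (l ++ [x]) k
      = match PySem.List.max? l k with
        | none => some x
        | some m => if k m < k x then some x else some m := by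
  unfold PySem.List.max?
  rw [List.foldl_append]
  rfl

-- ==== A-side structure lemmas ====

theorem pv_get?_foldl_insert (v : String → List String) (l : List String)
    (d : PySem.Dict String (List String)) (k : String) :
    (l.foldl (fun d pi => d.insert pi (v pi)) d).get? k
      = if k ∈ l then some (v k) else d.get? k := by
  induction l generalizing d with
  | nil => simp
  | cons p ps ih =>
    simp only [List.foldl_cons, ih, List.mem_cons]
    by_cases hps : k ∈ ps
    · simp [hps]
    · by_cases hkp : k = p
      · simp [hkp, PySem.Dict.get?_insert_self]
      · simp [hps, hkp, PySem.Dict.get?_insert_of_ne _ _ hkp]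

theorem pv_getD_foldl_insert (v : String → List String) (l : List String) (k : String) (hk : k ∈ l) :
    (l.foldl (fun d pi => d.insert pi (v pi)) (PySem.Dict.empty)).getD k [] = v k := by
  simp [PySem.Dict.getD, pv_get?_foldl_insert, hk]

theorem pv_items_foldl_insert (v : String → List String) (l : List String) :
    (l.foldl (fun d pi => d.insert pi (v pi)) (PySem.Dict.empty)).items
      = (PySem.Set.ofList l).map (fun k => (k, v k)) := by
  have hnd : (l.foldl (fun d pi => d.insert pi (v pi)) (PySem.Dict.empty : PySem.Dict String (List String))).keys.Nodup := by
    apply PySem.Dict.nodup_keys_foldl_insert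
    simp [PySem.Dict.keys, PySem.Dict.empty]
  have hkeys : (l.foldl (fun d pi => d.insert pi (v pi)) (PySem.Dict.empty : PySem.Dict String (List String))).keys = PySem.Set.ofList l := by
    rw [PySem.Dict.keys_foldl_insert]
    simp [PySem.Dict.keys, PySem.Dict.empty, PySem.Set.update_nil_left]
  rw [PySem.Dict.items_eq_map_keys _ hnd [], hkeys]
  apply List.map_congr_left
  intro k hk
  have : k ∈ l := (PySem.Set.mem_ofList _ _).mp hk
  simp [pv_getD_foldl_insert v l k this]

theorem pv_max?_map {α β : Type} (g : α → β) (l : List α) (k : β → Int) :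
    PySem.List.max? (l.map g) k = Option.map g (PySem.List.max? l (fun x => k (g x))) := by
  unfold PySem.List.max?
  suffices h : ∀ (acc : Option α),
      (l.map g).foldl (fun acc x => match acc with | none => some x | some m => if k m < k x then some x else some m) (Option.map g acc)
        = Option.map g (l.foldl (fun acc x => match acc with | none => some x | some m => if k (g m) < k (g x) then some x else some m) acc) by
    simpa using h none
  induction l with
  | nil => intro acc; simp
  | cons x xs ih =>
    intro acc
    match acc with
    | none => simpa using ih (some x)
    | some m =>
      simp only [List.map_cons, List.foldl_cons, Option.map_some]
      by_cases h : k (g m) < k (g x)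
      · simpa [h] using ih (some x)
      · simpa [h] using ih (some m)

theorem pv_max?_congr_aux {α : Type} (k1 k2 : α → Int) (l : List α) :
    ∀ (acc : Option α), (∀ x ∈ l, k1 x = k2 x) → (∀ m, acc = some m → k1 m = k2 m) →
      l.foldl (fun acc x => match acc with | none => some x | some m => if k1 m < k1 x then some x else some m) acc
        = l.foldl (fun acc x => match acc with | none => some x | some m => if k2 m < k2 x then some x else some m) acc := by
  induction l with
  | nil => intro acc _ _; simp
  | cons x xs ih =>
    intro acc h hacc
    have hx : k1 x = k2 x := h x (by simp)
    have hxs : ∀ y ∈ xs, k1 y = k2 y := fun y hy => h y (by simp [hy])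
    simp only [List.foldl_cons]
    match acc with
    | none => exact ih (some x) hxs (by intro m hm; cases hm; exact hx)
    | some m =>
      have hm : k1 m = k2 m := hacc m rfl
      have e1 : (match some m with | none => some x | some m => if k1 m < k1 x then some x else some m) = if k1 m < k1 x then some x else some m := rfl
      have e2 : (match some m with | none => some x | some m => if k2 m < k2 x then some x else some m) = if k2 m < k2 x then some x else some m := rfl
      rw [e1, e2, hm, hx]
      by_cases hlt : k2 m < k2 x
      · simp only [if_pos hlt]
        exact ih (some x) hxs (by intro m' hm'; cases hm'; exact hx)
      · simp only [if_neg hlt]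
        exact ih (some m) hxs (by intro m' hm'; cases hm'; exact hm)

theorem pv_max?_congr {α : Type} (l : List α) (k1 k2 : α → Int)
    (h : ∀ x ∈ l, k1 x = k2 x) : PySem.List.max? l k1 = PySem.List.max? l k2 := by
  unfold PySem.List.max?
  exact pv_max?_congr_aux k1 k2 l none h (by simp)

-- max? over the deduplicated list returns the same (first maximal) element
theorem pv_max?_ofList (l : List String) (k : String → Int) :
    PySem.List.max? (PySem.Set.ofList l) k = PySem.List.max? l k := by
  induction l using List.reverseRecOn with
  | nil => rfl
  | append_singleton l x ih =>
    have hof : PySem.Set.ofList (l ++ [x]) = (PySem.Set.ofList l).add x := by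
      simp [PySem.Set.ofList_eq_foldl, List.foldl_append]
    by_cases hx : x ∈ l
    · have hx' : x ∈ PySem.Set.ofList l := (PySem.Set.mem_ofList _ _).mpr hx
      rw [hof, pv_add_of_mem hx', ih, pv_max?_snoc]
      have hne : l ≠ [] := by intro h; subst h; simp at hx
      cases hm : PySem.List.max? l k with
      | none => exact absurd ((PySem.List.max?_eq_none_iff l k).mp hm) hne
      | some m =>
        have hle : k x ≤ k m := PySem.List.max?_isMax hm x hx
        simp [not_lt.mpr hle]
    · have hx' : x ∉ PySem.Set.ofList l := fun h => hx ((PySem.Set.mem_ofList _ _).mp h)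
      have : (PySem.Set.ofList l).add x = PySem.Set.ofList l ++ [x] := by
        simp only [PySem.Set.add, ite_eq_right_iff]
        intro hc
        exact absurd ((PySem.Set.contains_iff _ _).mp hc) hx'
      rw [hof, this, pv_max?_snoc, pv_max?_snoc, ih]

theorem pv_key_eq (minterms rem : List String) (hnd : rem.Nodup)
    (hsub : ∀ mt ∈ rem, mt ∈ minterms) (pi : String) :
    PySem.Set.len (PySem.Set.inter (PySem.Set.ofList (minterms.filter (fun mt => pvCovers pi mt))) rem)
      = (rem.countP (fun mt => pvCovers pi mt) : Int) := by
  unfold PySem.Set.len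
  rw [List.countP_eq_length_filter]
  congr 1
  apply List.Perm.length_eq
  rw [List.perm_ext_iff_of_nodup (PySem.Set.nodup_inter _ _ (PySem.Set.nodup_ofList _)) (hnd.filter _)]
  intro x
  rw [PySem.Set.mem_inter]
  simp only [PySem.Set.mem_ofList, List.mem_filter]
  constructor
  · rintro ⟨⟨hxm, hc⟩, hxr⟩; exact ⟨hxr, hc⟩
  · rintro ⟨hxr, hc⟩; exact ⟨⟨hsub x hxr, hc⟩, hxr⟩

theorem pv_rem_eq (minterms rem : List String)
    (hsub : ∀ mt ∈ rem, mt ∈ minterms) (pi : String) :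
    PySem.Set.diff rem (PySem.Set.ofList (minterms.filter (fun mt => pvCovers pi mt)))
      = rem.filter (fun mt => !pvCovers pi mt) := by
  unfold PySem.Set.diff
  apply List.filter_congr
  intro x hx
  congr 1
  by_cases hc : pvCovers pi x = true
  · have : x ∈ minterms.filter (fun mt => pvCovers pi mt) := List.mem_filter.mpr ⟨hsub x hx, hc⟩
    simp [PySem.Set.contains, hc, PySem.Set.mem_ofList, this]
  · have : x ∉ minterms.filter (fun mt => pvCovers pi mt) := by
      intro hmem; exact hc (List.of_mem_filter hmem)
    simp only [Bool.not_eq_true] at hc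
    simp [PySem.Set.contains, hc, PySem.Set.mem_ofList, this]

theorem pv_mem_foldl_union (f : String → List String) (l : List String)
    (c : PySem.Set String) (x : String) :
    x ∈ l.foldl (fun c pi => PySem.Set.union c (PySem.Set.ofList (f pi))) c
      ↔ x ∈ c ∨ ∃ pi ∈ l, x ∈ f pi := by
  induction l generalizing c with
  | nil => simp
  | cons q qs ih =>
    simp only [List.foldl_cons, ih, PySem.Set.mem_union, PySem.Set.mem_ofList, List.mem_cons]
    constructor
    · rintro ((h | h) | ⟨pi, hpi, hx⟩)
      · exact Or.inl h
      · exact Or.inr ⟨q, Or.inl rfl, h⟩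
      · exact Or.inr ⟨pi, Or.inr hpi, hx⟩
    · rintro (h | ⟨pi, (rfl | hpi), hx⟩)
      · exact Or.inl (Or.inl h)
      · exact Or.inl (Or.inr hx)
      · exact Or.inr ⟨pi, hpi, hx⟩

theorem pv_essential_subset (primes minterms : List String) (e : PySem.Set String)
    (he : ∀ x ∈ e, x ∈ primes) :
    ∀ x ∈ minterms.foldl (fun e mt =>
        let cov := primes.filter (fun pi => pvCovers pi mt)
        if cov.length == 1 then PySem.Set.add e (cov.headD "") else e) e,
      x ∈ primes := by
  induction minterms generalizing e with
  | nil => simpa using he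
  | cons mt mts ih =>
    simp only [List.foldl_cons]
    apply ih
    intro x hx
    by_cases h1 : ((primes.filter (fun pi => pvCovers pi mt)).length == 1) = true
    · rw [if_pos h1] at hx
      rcases (PySem.Set.mem_add _ _ _).mp hx with h | rfl
      · exact he x h
      · have hne : primes.filter (fun pi => pvCovers pi mt) ≠ [] := by
          intro hnil; simp [hnil] at h1
        have : (primes.filter (fun pi => pvCovers pi mt)).headD ""
            ∈ primes.filter (fun pi => pvCovers pi mt) := by
          cases hcov : primes.filter (fun pi => pvCovers pi mt) with
          | nil => exact absurd hcov hne
          | cons a as => simp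
        exact List.mem_of_mem_filter this
    · rw [if_neg h1] at hx
      exact he x hx

-- ==== the conditional-add fold is insensitive to deduplication of its index list ====

theorem pv_condAdd_mem (c : String → Bool) (g : String → String) :
    ∀ (l : List String) (s : PySem.Set String) (a : String),
      a ∈ s → a ∈ l.foldl (fun s x => if c x then PySem.Set.add s (g x) else s) s := by
  intro l
  induction l with
  | nil => intro s a h; simpa using h
  | cons x xs ih =>
    intro s a h
    simp only [List.foldl_cons]
    apply ih
    by_cases hc : c x = true
    · rw [if_pos hc]; exact (PySem.Set.mem_add _ _ _).mpr (Or.inl h)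
    · rw [if_neg hc]; exact h

theorem pv_condAdd_mem_of (c : String → Bool) (g : String → String) :
    ∀ (l : List String) (s : PySem.Set String) (x : String),
      x ∈ l → c x = true → g x ∈ l.foldl (fun s x => if c x then PySem.Set.add s (g x) else s) s := by
  intro l
  induction l with
  | nil => intro s x h; simp at h
  | cons y ys ih =>
    intro s x hx hc
    simp only [List.foldl_cons]
    rcases List.mem_cons.mp hx with rfl | hmem
    · apply pv_condAdd_mem
      rw [if_pos hc]
      exact (PySem.Set.mem_add _ _ _).mpr (Or.inr rfl)
    · exact ih _ x hmem hc

theorem pv_condAdd_dedup (c : String → Bool) (g : String → String) (l : List String) (s : PySem.Set String) :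
    (PySem.Set.ofList l).foldl (fun s x => if c x then PySem.Set.add s (g x) else s) s
      = l.foldl (fun s x => if c x then PySem.Set.add s (g x) else s) s := by
  induction l using List.reverseRecOn with
  | nil => rfl
  | append_singleton l x ih =>
    have hof : PySem.Set.ofList (l ++ [x]) = (PySem.Set.ofList l).add x := by
      simp [PySem.Set.ofList_eq_foldl, List.foldl_append]
    rw [List.foldl_append, hof]
    by_cases hx : x ∈ l
    · have hx' : x ∈ PySem.Set.ofList l := (PySem.Set.mem_ofList _ _).mpr hx
      rw [pv_add_of_mem hx', ih]
      simp only [List.foldl_cons, List.foldl_nil]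
      by_cases hc : c x = true
      · rw [if_pos hc]
        exact (pv_add_of_mem (pv_condAdd_mem_of c g l s x hx hc)).symm
      · rw [if_neg hc]
    · have : (PySem.Set.ofList l).add x = PySem.Set.ofList l ++ [x] := by
        simp only [PySem.Set.add, ite_eq_right_iff]
        intro hcon
        exact absurd ((PySem.Set.mem_ofList _ _).mp ((PySem.Set.contains_iff _ _).mp hcon)) hx
      rw [this, List.foldl_append, ih]

-- ==== B's essential fold computes A's essential fold over the distinct minterms ====

theorem pv_hits_eq (primes : List String) (F : String → Nat) (p : Nat → Bool) :
    ((primes.zip (primes.map F)).filter (fun pm => p pm.2)).map Prod.fst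
      = primes.filter (fun pi => p (F pi)) := by
  induction primes with
  | nil => simp
  | cons q qs ih =>
    simp only [List.map_cons, List.zip_cons_cons, List.filter_cons]
    by_cases hp : p (F q) = true
    · simp only [hp, if_pos, List.map_cons, ih]
    · simp only [hp, Bool.false_eq_true, if_false, ih]

theorem pv_essfold (primes umts : List String) :
    ∀ (l : List String) (k : Nat) (s : PySem.Set String), l = umts.drop k →
      (l.foldl (fun (s : PySem.Set String × Nat) _mt =>
        let hits := ((primes.zip (primes.map (fun pi => pvMask umts pi))).filter
            (fun pm => pm.2 &&& s.2 != 0)).map Prod.fst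
        (if hits.length == 1 then PySem.Set.add s.1 (hits.headD "") else s.1, s.2 + s.2)) (s, 2 ^ k))
      = (l.foldl (fun e mt =>
          let cov := primes.filter (fun pi => pvCovers pi mt)
          if cov.length == 1 then PySem.Set.add e (cov.headD "") else e) s, 2 ^ (k + l.length)) := by
  intro l
  induction l with
  | nil => intro k s _; simp
  | cons mt rest ih =>
    intro k s hdrop
    have hk : k < umts.length := by
      by_contra hk
      rw [List.drop_eq_nil_of_le (by omega)] at hdrop
      simp at hdrop
    have hd : umts.drop k = umts[k] :: umts.drop (k + 1) := (List.getElem_cons_drop hk).symm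
    rw [hd] at hdrop
    obtain ⟨hmt, hrest⟩ : mt = umts[k] ∧ rest = umts.drop (k + 1) := by
      constructor <;> [exact (List.cons.injEq .. ▸ hdrop).1; exact (List.cons.injEq .. ▸ hdrop).2]
    simp only [List.foldl_cons]
    have hhits : ((primes.zip (primes.map (fun pi => pvMask umts pi))).filter
          (fun pm => pm.2 &&& 2 ^ k != 0)).map Prod.fst
        = primes.filter (fun pi => pvCovers pi mt) := by
      rw [pv_hits_eq primes (fun pi => pvMask umts pi) (fun m => m &&& 2 ^ k != 0)]
      apply List.filter_congr
      intro pi _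
      have : (pvMask umts pi &&& 2 ^ k != 0) = (pvMask umts pi).testBit k := by
        rw [Nat.and_two_pow]
        cases h : (pvMask umts pi).testBit k
        · simp
        · simp [Nat.pow_eq_zero]
      rw [this, pv_mask_testBit, dif_pos hk, hmt]
    have hbit : (2:Nat) ^ k + 2 ^ k = 2 ^ (k + 1) := by ring
    rw [hhits, hbit, ih (k+1) _ hrest]
    simp only [List.length_cons]
    have he : k + 1 + rest.length = k + (rest.length + 1) := by omega
    rw [he]

theorem pv_zip_map {α β : Type} (F : α → β) (l : List α) :
    l.zip (l.map F) = l.map (fun x => (x, F x)) := by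
  induction l with
  | nil => rfl
  | cons x xs ih => simp [ih]

-- ==== the cleared-bits fold over zip (clearing essentials' columns) ====

theorem pv_clear_testBit (e : PySem.Set String) :
    ∀ (pairs : List (String × Nat)) (r : Nat) (j : Nat),
      (pairs.foldl (fun r pm => if PySem.Set.contains e pm.1 then r ^^^ (r &&& pm.2) else r) r).testBit j
        = (r.testBit j && pairs.all (fun pm => !(PySem.Set.contains e pm.1 && pm.2.testBit j))) := by
  intro pairs
  induction pairs with
  | nil => intro r j; simp
  | cons pm rest ih =>
    intro r j
    simp only [List.foldl_cons, List.all_cons]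
    rw [ih]
    by_cases hc : PySem.Set.contains e pm.1 = true
    · simp only [hc, if_pos]
      cases hr : r.testBit j <;> cases hm : pm.2.testBit j <;>
        simp [Nat.testBit_xor, Nat.testBit_and, hr, hm]
    · simp only [hc, Bool.false_eq_true, if_false, Bool.false_and, Bool.not_false, Bool.true_and]

-- ==== lock-step equality of the two while-loops ====

theorem pv_loop (primes minterms : List String) :
    ∀ (f : Nat) (r : Nat) (ess : PySem.Set String),
      (∀ j, (PySem.List.dedup minterms).length ≤ j → r.testBit j = false) →
      pvLoopA ((PySem.Set.ofList primes).map (fun pi => (pi, minterms.filter (fun mt => pvCovers pi mt))))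
          f (pvSel (PySem.List.dedup minterms) r) ess
        = pvGreedy (primes.zip (primes.map (fun pi => pvMask (PySem.List.dedup minterms) pi))) f r ess := by
  intro f
  induction f with
  | zero => intro r ess _; rfl
  | succ f ih =>
    intro r ess hinv
    rw [pvLoopA, pvGreedy]
    by_cases hr0 : r = 0
    · subst hr0
      rw [if_pos (by simp [pv_sel_zero]), if_pos rfl]
    · have hnil : pvSel (PySem.List.dedup minterms) r ≠ [] := by
        intro h
        exact hr0 ((pv_sel_nil_iff _ r hinv).mp h)
      rw [if_neg (by simpa [List.isEmpty_iff] using hnil), if_neg hr0]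
      have hndu : (PySem.List.dedup minterms).Nodup := by
        rw [PySem.List.dedup_eq_ofList]; exact PySem.Set.nodup_ofList _
      have hnd : (pvSel (PySem.List.dedup minterms) r).Nodup :=
        List.Nodup.sublist (pv_sel_sublist _ r) hndu
      have hsub : ∀ mt ∈ pvSel (PySem.List.dedup minterms) r, mt ∈ minterms := by
        intro mt hmt
        have hmem := (pv_sel_sublist (PySem.List.dedup minterms) r).mem hmt
        rwa [PySem.List.mem_dedup] at hmem
      -- the two keys agree on every prime
      have hkey : ∀ pi ∈ primes,
          PySem.Set.len (PySem.Set.inter (PySem.Set.ofList (minterms.filter (fun mt => pvCovers pi mt)))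
              (pvSel (PySem.List.dedup minterms) r))
            = ((pvPop (pvMask (PySem.List.dedup minterms) pi &&& r)) : Int) := by
        intro pi _
        rw [pv_key_eq minterms _ hnd hsub pi]
        have hlt : pvMask (PySem.List.dedup minterms) pi &&& r < 2 ^ (PySem.List.dedup minterms).length :=
          lt_of_le_of_lt Nat.and_le_left (pv_mask_lt _ _)
        have hn : pvPop (pvMask (PySem.List.dedup minterms) pi &&& r)
            = (pvSel (PySem.List.dedup minterms) r).countP (fun mt => pvCovers pi mt) := by
          rw [pv_pop_eq_countP _ _ hlt, pv_sel_countP]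
          apply List.countP_congr
          intro j hj
          have hjn : j < (PySem.List.dedup minterms).length := List.mem_range.mp hj
          have hjn' : j < (PySem.Set.ofList minterms).length := by
            simpa [PySem.List.dedup_eq_ofList] using hjn
          simp [Nat.testBit_and, pv_mask_testBit, PySem.List.dedup_eq_ofList, hjn',
            Bool.and_comm]
        exact_mod_cast congrArg (Nat.cast : Nat → Int) hn.symm
      -- both maxima are the image of the same underlying maximum over primes
      have hA : PySem.List.max? ((PySem.Set.ofList primes).map (fun pi => (pi, minterms.filter (fun mt => pvCovers pi mt))))
            (fun kv => PySem.Set.len (PySem.Set.inter (PySem.Set.ofList kv.2) (pvSel (PySem.List.dedup minterms) r)))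
          = Option.map (fun pi => (pi, minterms.filter (fun mt => pvCovers pi mt)))
              (PySem.List.max? primes (fun pi => ((pvPop (pvMask (PySem.List.dedup minterms) pi &&& r)) : Int))) := by
        rw [pv_max?_map, pv_max?_ofList, pv_max?_congr _ _ _ hkey]
      have hB : PySem.List.max? (primes.zip (primes.map (fun pi => pvMask (PySem.List.dedup minterms) pi)))
            (fun pm => ((pvPop (pm.2 &&& r)) : Int))
          = Option.map (fun pi => (pi, pvMask (PySem.List.dedup minterms) pi))
              (PySem.List.max? primes (fun pi => ((pvPop (pvMask (PySem.List.dedup minterms) pi &&& r)) : Int))) := by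
        rw [pv_zip_map, pv_max?_map]
      rw [hA, hB]
      cases hX : PySem.List.max? primes (fun pi => ((pvPop (pvMask (PySem.List.dedup minterms) pi &&& r)) : Int)) with
      | none => rfl
      | some pistar =>
        simp only [Option.map_some]
        rw [pv_rem_eq minterms _ hsub pistar]
        have hsel : (pvSel (PySem.List.dedup minterms) r).filter (fun mt => !pvCovers pistar mt)
            = pvSel (PySem.List.dedup minterms) (r ^^^ (r &&& pvMask (PySem.List.dedup minterms) pistar)) := by
          symm
          apply pv_sel_filter
          intro j hj
          have hj' : j < (PySem.Set.ofList minterms).length := by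
            simpa [PySem.List.dedup_eq_ofList] using hj
          cases h1 : r.testBit j <;> cases h2 : pvCovers pistar ((PySem.Set.ofList minterms))[j] <;>
            simp [Nat.testBit_xor, Nat.testBit_and, pv_mask_testBit, PySem.List.dedup_eq_ofList,
              hj', h1, h2]
        rw [hsel]
        apply ih
        intro j hj
        simp [Nat.testBit_xor, Nat.testBit_and, hinv j hj]

theorem pv_main (primes minterms : List String) :
    select_essential_py primes minterms = select_essential_py_alt primes minterms := by
  unfold select_essential_py select_essential_py_alt
  simp only []
  set n := (PySem.List.dedup minterms).length with hn
  set stepA := (fun (e : PySem.Set String) (mt : String) =>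
      let cov := primes.filter (fun pi => pvCovers pi mt)
      if cov.length == 1 then PySem.Set.add e (cov.headD "") else e) with hstepA
  set essA := minterms.foldl stepA PySem.Set.empty with hessA
  -- B's combined essential/bit fold computes (essA, 2 ^ n)
  have hcb : (PySem.List.dedup minterms).foldl (fun (s : PySem.Set String × Nat) _mt =>
        let hits := ((primes.zip (primes.map (fun pi => pvMask (PySem.List.dedup minterms) pi))).filter
            (fun pm => pm.2 &&& s.2 != 0)).map Prod.fst
        (if hits.length == 1 then PySem.Set.add s.1 (hits.headD "") else s.1, s.2 + s.2))
      (PySem.Set.empty, 1)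
      = (essA, 2 ^ n) := by
    have h1 := pv_essfold primes (PySem.List.dedup minterms) (PySem.List.dedup minterms) 0
      PySem.Set.empty List.drop_zero.symm
    rw [pow_zero] at h1
    rw [h1, hessA, hstepA]
    have h2 := pv_condAdd_dedup (fun mt => (primes.filter (fun pi => pvCovers pi mt)).length == 1)
      (fun mt => (primes.filter (fun pi => pvCovers pi mt)).headD "") minterms PySem.Set.empty
    rw [← PySem.List.dedup_eq_ofList] at h2
    rw [Nat.zero_add, h2]
  rw [hcb]
  simp only []
  set covered := essA.foldl (fun c pi => PySem.Set.union c (PySem.Set.ofList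
      ((primes.foldl (fun d pi => d.insert pi (minterms.filter (fun mt => pvCovers pi mt))) PySem.Dict.empty).getD pi [])))
    PySem.Set.empty with hcovered
  set rem0 := (primes.zip (primes.map (fun pi => pvMask (PySem.List.dedup minterms) pi))).foldl
      (fun r pm => if PySem.Set.contains essA pm.1 then r ^^^ (r &&& pm.2) else r) (2 ^ n - 1) with hrem0
  have hessp : ∀ x ∈ essA, x ∈ primes := by
    rw [hessA, hstepA]
    exact pv_essential_subset primes minterms PySem.Set.empty (by intro x hx; cases hx)
  have hhigh : ∀ j, n ≤ j → rem0.testBit j = false := by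
    intro j hj
    rw [hrem0, pv_clear_testBit]
    have hnj : ¬ (j < n) := by omega
    simp [Nat.testBit_two_pow_sub_one, hnj]
  have hlt2 : rem0 < 2 ^ n := Nat.lt_pow_two_of_testBit rem0 hhigh
  have hmemD : ∀ pi ∈ primes,
      ((primes.foldl (fun d pi => d.insert pi (minterms.filter (fun mt => pvCovers pi mt))) PySem.Dict.empty).getD pi [])
        = minterms.filter (fun mt => pvCovers pi mt) :=
    fun pi hpi => pv_getD_foldl_insert _ primes pi hpi
  have hcov : ∀ mt, mt ∈ covered ↔ ∃ pi ∈ essA, pvCovers pi mt = true ∧ mt ∈ minterms := by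
    intro mt
    rw [hcovered, pv_mem_foldl_union]
    constructor
    · rintro (h | ⟨pi, hpi, hx⟩)
      · cases h
      · rw [hmemD pi (hessp pi hpi)] at hx
        rcases List.mem_filter.mp hx with ⟨h1, h2⟩
        exact ⟨pi, hpi, h2, h1⟩
    · rintro ⟨pi, hpi, hc, hm⟩
      exact Or.inr ⟨pi, hpi, by rw [hmemD pi (hessp pi hpi)]; exact List.mem_filter.mpr ⟨hm, hc⟩⟩
  have hchar : ∀ j (hjn : j < (PySem.List.dedup minterms).length),
      rem0.testBit j = !(PySem.Set.contains covered ((PySem.List.dedup minterms)[j])) := by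
    intro j hjn
    rw [hrem0, pv_clear_testBit, pv_zip_map, List.all_map]
    have hd : ((2:Nat) ^ n - 1).testBit j = true := by
      simp [Nat.testBit_two_pow_sub_one]
      exact hjn
    rw [hd, Bool.true_and, Bool.eq_iff_iff]
    simp only [List.all_eq_true, Function.comp_apply, Bool.not_eq_true', Bool.and_eq_false_iff]
    constructor
    · intro hall
      by_contra hcon
      simp only [Bool.not_eq_false] at hcon
      rcases (hcov _).mp ((PySem.Set.contains_iff _ _).mp hcon) with ⟨pi, hpi, hc, _⟩
      rcases hall pi (hessp pi hpi) with h | h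
      · rw [(PySem.Set.contains_iff essA pi).mpr hpi] at h
        simp at h
      · rw [pv_mask_testBit, dif_pos hjn, hc] at h
        simp at h
    · intro hnc pi hpi
      by_cases he : pi ∈ essA
      · right
        rw [pv_mask_testBit, dif_pos hjn]
        by_contra hcb2
        simp only [Bool.not_eq_false] at hcb2
        have : (PySem.List.dedup minterms)[j] ∈ covered :=
          (hcov _).mpr ⟨pi, he, hcb2, by
            have hgm := List.getElem_mem hjn
            rwa [PySem.List.mem_dedup] at hgm⟩
        rw [(PySem.Set.contains_iff covered _).mpr this] at hnc
        simp at hnc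
      · left
        exact Bool.eq_false_iff.mpr (fun h => he ((PySem.Set.contains_iff _ _).mp h))
  have hselrem : pvSel (PySem.List.dedup minterms) rem0
      = PySem.Set.diff (PySem.Set.ofList minterms) covered := by
    rw [pv_sel_eq_filter_of (fun mt => !(PySem.Set.contains covered mt)) (PySem.List.dedup minterms) rem0 hchar]
    unfold PySem.Set.diff
    rw [← PySem.List.dedup_eq_ofList]
  have hfuel : (pvSel (PySem.List.dedup minterms) rem0).length = pvPop rem0 := by
    have h1 := pv_sel_countP (fun _ : String => true) (PySem.List.dedup minterms) rem0
    simp only [List.countP_true, Bool.and_true] at h1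
    rw [h1, pv_pop_eq_countP _ rem0 hlt2]
  rw [pv_items_foldl_insert (fun pi => minterms.filter (fun mt => pvCovers pi mt)) primes,
    ← hselrem, hfuel]
  exact pv_loop primes minterms (pvPop rem0) rem0 essA hhigh

-- ===== VERDICT (by name: the statement is the Claim_ definition above) =====
theorem select_essential_py_spec : Claim_equal_select_essential_py := by
  intro primes minterms _ _
  unfold Spec_select_essential_py
  exact pv_main primes minterms
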